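-- pv_equiv track=rewrite | github.com/userljz/clipwiki | src/clipwiki/core.py | _unique_session_id
-- ===== SOURCE A (Python) =====
-- def _unique_session_id(base_id: str, used_ids: set[str]) -> str:
--     if base_id not in used_ids:
--         used_ids.add(base_id)
--         return base_id
--     suffix = 2
--     while f"{base_id}-{suffix}" in used_ids:
--         suffix += 1
--     session_id = f"{base_id}-{suffix}"
--     used_ids.add(session_id)
--     return session_id
-- ===== SOURCE B (Python) =====
-- def _unique_session_id(base_id: str, used_ids: set[str]) -> str:
--     if base_id not in used_ids:
--         used_ids.add(base_id)
--         return base_id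
--     n = len(used_ids)
--     # Index the n+1 candidate ids by slot; at most n of the slots can be taken,
--     # so the first free slot always exists.
--     pos = {f"{base_id}-{s}": s - 2 for s in range(2, n + 3)}
--     present = [False] * (n + 1)
--     for u in used_ids:
--         i = pos.get(u)
--         if i is not None:
--             present[i] = True
--     session_id = f"{base_id}-{2 + present.index(False)}"
--     used_ids.add(session_id)
--     return session_id
-- ===== Notes on version B (the rewrite author's own statement) =====
-- stated objective: alternative
-- what changed: Replaces A's sequential membership probing (try base-2, base-3, ... against the set until a miss) with a one-pass marking algorithm: build a dict indexing the n+1 candidate ids by slot, scan used_ids once marking taken slots in a boolean array, and take the first unmarked slot.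
import Mathlib
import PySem

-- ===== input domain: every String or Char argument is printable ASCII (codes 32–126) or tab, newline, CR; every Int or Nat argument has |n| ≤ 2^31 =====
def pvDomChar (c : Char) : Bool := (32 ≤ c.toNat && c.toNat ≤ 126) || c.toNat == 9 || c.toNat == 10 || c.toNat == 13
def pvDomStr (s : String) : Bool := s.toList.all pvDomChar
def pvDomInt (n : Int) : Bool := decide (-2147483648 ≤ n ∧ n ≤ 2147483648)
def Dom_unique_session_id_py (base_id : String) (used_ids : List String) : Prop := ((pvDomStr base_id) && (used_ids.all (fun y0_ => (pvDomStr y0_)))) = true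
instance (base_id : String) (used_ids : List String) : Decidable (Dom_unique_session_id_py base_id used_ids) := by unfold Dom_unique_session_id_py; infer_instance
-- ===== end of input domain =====

-- B replaces A's sequential probing against the set by a one-pass marking algorithm
-- (candidate→slot index map, boolean slot array, first free slot); objective: alternative.
-- Both Pythons also add the returned id to used_ids in place; the mutation is identical in
-- both and the equivalence proved here is about the RETURN value.

-- ===== PORT A =====
-- f"{base_id}-{suffix}"
def pvCandA (base : String) (s : Nat) : String :=
  String.ofList (base.toList ++ '-' :: PySem.Int.toChars (Int.ofNat s))

-- the 'while f"{base_id}-{suffix}" in used_ids: suffix += 1' loop; fuel makes it total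
-- (the fuel used below, used_ids.length + 1, is never exhausted: the candidates are
-- pairwise distinct strings, so at most used_ids.length of them can be members)
def pvLoopA (base : String) (used : List String) : Nat → Nat → String
  | 0, s => pvCandA base s
  | f + 1, s =>
      if used.contains (pvCandA base s) then pvLoopA base used f (s + 1)
      else pvCandA base s

def unique_session_id_py (base_id : String) (used_ids : List String) : String :=
  if used_ids.contains base_id then
    pvLoopA base_id used_ids (used_ids.length + 1) 2
  else base_id

-- ===== PORT B =====
-- f"{base_id}-{s}"
def pvCandB (base : String) (s : Int) : String :=
  String.ofList (base.toList ++ '-' :: PySem.Int.toChars s)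

-- the body of 'for u in used_ids: i = pos.get(u); if i is not None: present[i] = True'
-- ('present[i] = True' is List.set; every i stored in pos is a valid index of present)
def pvMark (pos : PySem.Dict String Int) (pr : List Bool) (u : String) : List Bool :=
  match PySem.Dict.get? pos u with
  | some i => pr.set i.toNat true
  | none => pr

def unique_session_id_py_alt (base_id : String) (used_ids : List String) : String :=
  if used_ids.contains base_id then
    let n := used_ids.length
    -- pos = {f"{base_id}-{s}": s - 2 for s in range(2, n + 3)}
    let pos : PySem.Dict String Int :=
      (PySem.List.pyRange 2 ((n : Int) + 3)).foldl
        (fun d s => d.insert (pvCandB base_id s) (s - 2)) PySem.Dict.empty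
    -- present = [False] * (n + 1), then the marking pass
    let present := used_ids.foldl (pvMark pos) (List.replicate (n + 1) false)
    -- present.index(False): a free slot always exists (n+1 slots, ≤ n marked),
    -- so .index cannot raise and getD's default is unreachable
    pvCandB base_id (2 + ((PySem.List.index? present false).getD 0 : Nat))
  else base_id

-- ===== PRECONDITION & SPEC =====
def Spec_unique_session_id_py (base_id : String) (used_ids : List String) (out : String) : Prop := out = unique_session_id_py_alt base_id used_ids
instance (base_id : String) (used_ids : List String) (out : String) : Decidable (Spec_unique_session_id_py base_id used_ids out) := by unfold Spec_unique_session_id_py; infer_instance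

-- ===== CLAIM (what is proved, stated in full; the proofs are below) =====
def Claim_equal_unique_session_id_py : Prop := ∀ (base_id : String) (used_ids : List String), Dom_unique_session_id_py base_id used_ids → Spec_unique_session_id_py base_id used_ids (unique_session_id_py base_id used_ids)

-- ===== LEMMAS AND PROOFS =====

-- Nat.digitChar is injective below 10
theorem pvDigitChar_inj (a b : Nat) (ha : a < 10) (hb : b < 10)
    (h : Nat.digitChar a = Nat.digitChar b) : a = b := by
  interval_cases a <;> interval_cases b <;> simp_all [Nat.digitChar]

-- decimal digit strings are injective
theorem pvToDigits_inj (m : Nat) : ∀ n, Nat.toDigits 10 m = Nat.toDigits 10 n → m = n := by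
  induction m using Nat.strong_induction_on with
  | _ m ih =>
    intro n h
    by_cases hm : m < 10 <;> by_cases hn : n < 10
    · rw [Nat.toDigits_of_lt_base hm, Nat.toDigits_of_lt_base hn] at h
      simp at h
      exact pvDigitChar_inj m n hm hn h
    · rw [Nat.toDigits_of_lt_base hm,
        Nat.toDigits_of_base_le (b := 10) (n := n) (by norm_num) (by omega)] at h
      have hl := congrArg List.length h
      have := Nat.length_toDigits_pos (b := 10) (n := n / 10)
      simp only [List.length_cons, List.length_append, List.length_nil] at hl
      omega
    · rw [Nat.toDigits_of_base_le (b := 10) (n := m) (by norm_num) (by omega),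
        Nat.toDigits_of_lt_base hn] at h
      have hl := congrArg List.length h
      have := Nat.length_toDigits_pos (b := 10) (n := m / 10)
      simp only [List.length_cons, List.length_append, List.length_nil] at hl
      omega
    · rw [Nat.toDigits_of_base_le (b := 10) (n := m) (by norm_num) (by omega),
        Nat.toDigits_of_base_le (b := 10) (n := n) (by norm_num) (by omega)] at h
      have hlast := congrArg List.getLast? h
      simp [List.getLast?_append] at hlast
      have hmod : m % 10 = n % 10 :=
        pvDigitChar_inj _ _ (Nat.mod_lt _ (by norm_num)) (Nat.mod_lt _ (by norm_num)) hlast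
      have hinit := congrArg List.dropLast h
      simp at hinit
      have hdiv : m / 10 = n / 10 := ih (m / 10) (by omega) _ hinit
      omega

theorem pvCandA_inj (base : String) (s t : Nat) (h : pvCandA base s = pvCandA base t) :
    s = t := by
  unfold pvCandA at h
  have h2 := congrArg String.toList h
  simp [PySem.Int.toChars] at h2
  exact pvToDigits_inj _ _ h2

-- B's candidate strings are A's
theorem pvCandB_eq (base : String) (j : Nat) : pvCandB base ((j : Int) + 2) = pvCandA base (2 + j) := by
  unfold pvCandA pvCandB
  rw [show ((j : Int) + 2) = Int.ofNat (2 + j) by simp [Int.ofNat_eq_natCast]; ring]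

-- range(2, n + 3) is the slots shifted by 2
theorem pvRange_eq (n : Nat) :
    PySem.List.pyRange 2 ((n : Int) + 3) = (List.range (n + 1)).map (fun (j : Nat) => (j : Int) + 2) := by
  unfold PySem.List.pyRange
  rw [if_neg (by norm_num : ¬(1:Int) = 0), if_pos (by norm_num : (0:Int) < 1),
    if_pos (by omega : (2:Int) < (n:Int)+3)]
  rw [show ((n:Int)+3-2+1-1)/1 = (n:Int)+1 by omega]
  rw [show ((n:Int)+1).toNat = n+1 by omega]
  show List.map (fun k => (2:Int) + 1 * ↑k) (List.range (n+1)) = _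
  exact List.map_congr_left (fun j _ => by ring)

-- the dict comprehension builds exactly the association list of (candidate, slot) pairs
theorem pvItems_fold (base : String) :
    ∀ (l : List Nat) (d : PySem.Dict String Int), l.Nodup →
      (∀ j ∈ l, d.contains (pvCandA base (2 + j)) = false) →
      (l.foldl (fun d j => d.insert (pvCandA base (2 + j)) (j : Int)) d).items
        = d.items ++ l.map (fun j => (pvCandA base (2 + j), (j : Int))) := by
  intro l
  induction l with
  | nil => intro d _ _; simp
  | cons j l ih =>
    intro d hnd hfresh
    have hins : (d.insert (pvCandA base (2 + j)) (j : Int)).items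
        = d.items ++ [(pvCandA base (2 + j), (j : Int))] := by
      simp [PySem.Dict.insert, hfresh j (by simp)]
    rw [List.foldl_cons, ih _ (by exact hnd.of_cons)]
    · rw [hins]; simp
    · intro j' hj'
      simp only [PySem.Dict.contains, hins, List.any_append]
      have h1 : d.contains (pvCandA base (2 + j')) = false := hfresh j' (by simp [hj'])
      simp only [PySem.Dict.contains] at h1
      rw [h1]
      simp only [Bool.false_or, List.any_cons, List.any_nil, Bool.or_false]
      apply beq_eq_false_iff_ne.mpr
      intro hc
      have hjj : j = j' := by have := pvCandA_inj base _ _ hc; omega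
      exact (List.nodup_cons.mp hnd).1 (hjj ▸ hj')

-- the dict comprehension's lookup: first slot whose candidate equals u
theorem pvGet?_pos (base : String) (n : Nat) (u : String) :
    PySem.Dict.get?
      ((PySem.List.pyRange 2 ((n : Int) + 3)).foldl
        (fun d s => d.insert (pvCandB base s) (s - 2)) PySem.Dict.empty) u
      = ((List.range (n + 1)).find? (fun j => pvCandA base (2 + j) == u)).map
          (fun (j : Nat) => (j : Int)) := by
  rw [pvRange_eq, List.foldl_map]
  have hfun : ∀ (d : PySem.Dict String Int) (j : Nat),
      d.insert (pvCandB base ((j : Int) + 2)) ((j : Int) + 2 - 2)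
        = d.insert (pvCandA base (2 + j)) (j : Int) := by
    intro d j
    rw [pvCandB_eq]
    norm_num
  rw [show (fun (x : PySem.Dict String Int) (y : Nat) =>
      x.insert (pvCandB base ((y : Int) + 2)) ((y : Int) + 2 - 2))
      = (fun (x : PySem.Dict String Int) (y : Nat) => x.insert (pvCandA base (2 + y)) (y : Int))
    from funext fun d => funext fun j => hfun d j]
  rw [PySem.Dict.get?,
    pvItems_fold base (List.range (n + 1)) PySem.Dict.empty List.nodup_range
      (fun j _ => by simp [PySem.Dict.contains, PySem.Dict.empty])]
  simp [PySem.Dict.empty, List.find?_map, Function.comp_def]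

-- the marking pass: slot j ends up true iff some scanned id equals candidate j
theorem pvMark_fold (base : String) (n : Nat) (pos : PySem.Dict String Int)
    (hget : ∀ u, PySem.Dict.get? pos u
      = ((List.range (n + 1)).find? (fun j => pvCandA base (2 + j) == u)).map
          (fun (j : Nat) => (j : Int))) :
    ∀ (l : List String) (pr : List Bool), pr.length = n + 1 →
      (l.foldl (pvMark pos) pr).length = n + 1 ∧
      ∀ j, j < n + 1 →
        (l.foldl (pvMark pos) pr).getD j false
          = (pr.getD j false || l.any (fun u => u == pvCandA base (2 + j))) := by
  intro l
  induction l with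
  | nil => intro pr hpr; exact ⟨hpr, fun j hj => by simp⟩
  | cons u l ih =>
    intro pr hpr
    rw [List.foldl_cons]
    cases hfind : (List.range (n + 1)).find? (fun j => pvCandA base (2 + j) == u) with
    | none =>
      have hm : pvMark pos pr u = pr := by
        unfold pvMark
        rw [hget u, hfind]
        simp
      rw [hm]
      obtain ⟨hlen, hval⟩ := ih pr hpr
      refine ⟨hlen, fun j hj => ?_⟩
      rw [hval j hj]
      have hne : (u == pvCandA base (2 + j)) = false := by
        apply beq_eq_false_iff_ne.mpr
        intro hequ
        have := List.find?_eq_none.mp hfind j (by simpa using hj)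
        simp [hequ] at this
      simp [hne]
    | some j' =>
      have hj'lt : j' < n + 1 := by simpa using List.mem_of_find?_eq_some hfind
      have hj'eq : pvCandA base (2 + j') = u := by
        have := List.find?_some hfind
        simpa using this
      have hm : pvMark pos pr u = pr.set j' true := by
        unfold pvMark
        rw [hget u, hfind]
        simp
      rw [hm]
      have hlen' : (pr.set j' true).length = n + 1 := by simp [hpr]
      obtain ⟨hlen, hval⟩ := ih _ hlen'
      refine ⟨hlen, fun j hj => ?_⟩
      rw [hval j hj]
      by_cases hjj : j = j'
      · subst hjj
        have hset : (pr.set j true).getD j false = true := by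
          simp [List.getD, show j < pr.length by omega]
        have hu : (u == pvCandA base (2 + j)) = true := by simp [← hj'eq]
        simp only [hset, hu, List.any_cons, Bool.true_or, Bool.or_true]
      · have hset : (pr.set j' true).getD j false = pr.getD j false := by
          simp [List.getD, List.getElem?_set_ne (by omega : j' ≠ j)]
        have hne : (u == pvCandA base (2 + j)) = false := by
          apply beq_eq_false_iff_ne.mpr
          intro hequ
          have hc : pvCandA base (2 + j') = pvCandA base (2 + j) := hj'eq.trans hequ
          have := pvCandA_inj base _ _ hc
          omega
        simp only [hset, hne, List.any_cons, Bool.false_or]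

-- pigeonhole: among the used_ids.length + 1 candidates, one is free
theorem pvFree_exists (base : String) (used : List String) :
    ∃ j, j < used.length + 1 ∧ used.contains (pvCandA base (2 + j)) = false := by
  by_contra hall
  push_neg at hall
  have hmem : ∀ j < used.length + 1, pvCandA base (2 + j) ∈ used := by
    intro j hj
    have h := hall j hj
    have : used.contains (pvCandA base (2 + j)) = true := by
      cases hcb : used.contains (pvCandA base (2 + j)) with
      | false => exact absurd hcb h
      | true => rfl
    simpa using this
  have hnd : ((List.range (used.length + 1)).map (fun j => pvCandA base (2 + j))).Nodup := by
    refine List.Nodup.map_on ?_ List.nodup_range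
    intro a _ b _ hab
    have := pvCandA_inj base _ _ hab
    omega
  have hsub : ((List.range (used.length + 1)).map (fun j => pvCandA base (2 + j))) ⊆ used := by
    intro x hx
    simp only [List.mem_map, List.mem_range] at hx
    obtain ⟨j, hj, rfl⟩ := hx
    exact hmem j hj
  have hle : used.length + 1 ≤ used.length := by
    calc used.length + 1
        = ((List.range (used.length + 1)).map (fun j => pvCandA base (2 + j))).length := by simp
      _ = ((List.range (used.length + 1)).map (fun j => pvCandA base (2 + j))).toFinset.card :=
          (List.toFinset_card_of_nodup hnd).symm
      _ ≤ used.toFinset.card := Finset.card_le_card (by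
          intro x hx
          simp only [List.mem_toFinset] at hx ⊢
          exact hsub hx)
      _ ≤ used.length := used.toFinset_card_le
  omega

-- running A's probe loop when the first free slot is known
theorem pvLoopA_run (base : String) (used : List String) (j0 : Nat)
    (hmin : ∀ k, k < j0 → used.contains (pvCandA base (2 + k)) = true)
    (hfree : used.contains (pvCandA base (2 + j0)) = false) :
    ∀ (fuel i : Nat), i ≤ j0 → j0 - i < fuel →
      pvLoopA base used fuel (2 + i) = pvCandA base (2 + j0) := by
  intro fuel
  induction fuel with
  | zero => intro i _ h; omega
  | succ f ih =>
    intro i hle hfuel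
    by_cases hij : i = j0
    · subst hij
      simp only [pvLoopA]
      rw [hfree]
      simp
    · have hlt : i < j0 := by omega
      have : pvLoopA base used (f + 1) (2 + i) = pvLoopA base used f (2 + i + 1) := by
        simp only [pvLoopA]
        rw [hmin i hlt]
        simp
      rw [this, show 2 + i + 1 = 2 + (i + 1) by omega]
      exact ih (i + 1) (by omega) (by omega)

-- ===== VERDICT (by name: the statement is the Claim_ definition above) =====
theorem unique_session_id_py_spec : Claim_equal_unique_session_id_py := by
  intro base used _
  unfold Spec_unique_session_id_py
  by_cases hb : used.contains base
  case neg =>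
    unfold unique_session_id_py unique_session_id_py_alt
    rw [if_neg hb, if_neg hb]
  case pos =>
    have hex : ∃ j, used.contains (pvCandA base (2 + j)) = false := by
      obtain ⟨j, _, hj⟩ := pvFree_exists base used
      exact ⟨j, hj⟩
    set j0 := Nat.find hex with hj0def
    have hfree : used.contains (pvCandA base (2 + j0)) = false := Nat.find_spec hex
    have hmin : ∀ k, k < j0 → used.contains (pvCandA base (2 + k)) = true := by
      intro k hk
      have hnf := Nat.find_min hex hk
      cases h : used.contains (pvCandA base (2 + k)) with
      | false => exact absurd h hnf
      | true => rfl
    have hj0lt : j0 < used.length + 1 := by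
      obtain ⟨j, hjlt, hj⟩ := pvFree_exists base used
      exact lt_of_le_of_lt (Nat.find_min' hex hj) hjlt
    have hA : unique_session_id_py base used = pvCandA base (2 + j0) := by
      unfold unique_session_id_py
      rw [if_pos hb]
      have := pvLoopA_run base used j0 hmin hfree (used.length + 1) 0 (by omega) (by omega)
      simpa using this
    have hB : unique_session_id_py_alt base used = pvCandA base (2 + j0) := by
      unfold unique_session_id_py_alt
      rw [if_pos hb]
      show pvCandB base (2 + ((PySem.List.index?
          (used.foldl (pvMark ((PySem.List.pyRange 2 ((used.length : Int) + 3)).foldl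
              (fun d s => d.insert (pvCandB base s) (s - 2)) PySem.Dict.empty))
            (List.replicate (used.length + 1) false)) false).getD 0 : Nat))
        = pvCandA base (2 + j0)
      set pos : PySem.Dict String Int :=
        (PySem.List.pyRange 2 ((used.length : Int) + 3)).foldl
          (fun d s => d.insert (pvCandB base s) (s - 2)) PySem.Dict.empty with hpos
      obtain ⟨hplen, hpval⟩ := pvMark_fold base used.length pos
        (fun u => by rw [hpos]; exact pvGet?_pos base used.length u) used
        (List.replicate (used.length + 1) false) (by simp)
      set present := used.foldl (pvMark pos) (List.replicate (used.length + 1) false) with hpres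
      have hval : ∀ j, j < used.length + 1 →
          present.getD j false = used.contains (pvCandA base (2 + j)) := by
        intro j hj
        rw [hpres, hpval j hj]
        simp [List.any_beq']
      have hidx : PySem.List.index? present false = some j0 := by
        rw [PySem.List.index?]
        refine List.idxOf?_eq_some_iff.mpr ⟨by omega, ?_, ?_⟩
        · rw [← List.getD_eq_getElem present false (by omega), hval j0 (by omega)]
          exact hfree
        · intro j hjlt'
          rw [← List.getD_eq_getElem present false (by omega), hval j (by omega),
            hmin j hjlt']
          simp
      rw [hidx]
      show pvCandB base (2 + (j0 : Int)) = pvCandA base (2 + j0)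
      rw [show ((2 : Int) + (j0 : Int)) = ((j0 : Int) + 2) from add_comm _ _]
      exact pvCandB_eq base j0
    rw [hA, hB]
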